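-- pv_equiv track=rewrite | github.com/clara-upem/Chess | chess.py | mvt_t_h
-- ===== SOURCE A (Python) =====
-- def check_position_piece(x, y, joueur):
--     """
--     Permet de verifier si une piece est dans le set
--     :param x:int, index d'un tableau (lignes)
--     :param y:int, index du tableau (colonnes)
--     :param joueur: list, tableau de pieces d'un joueur
--     :return:True si il y a une pieces et False si il n'y en a pas
--
--     >>> check_position_piece(1,1,[['P', (1, 0)]])
--     False
--
--     >>> check_position_piece(1, 0, [['P', (1, 0)]])
--     True
--     """
--     for e in joueur:
--         if e[1] == (x, y):
--             return True
--     return False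
--
-- def mvt_t_h(x, y, joueur, adversaire):
--     """
--     Permet de définir tous les mouvements de la tour horizontalement
--     :param x:int, index d'un tableau (lignes)
--     :param y:int, index d'un tableau (colonnes)
--     :param joueur: list, tableau pièces du joueur 1
--     :param adversaire: list, tableau pièces du second joueur
--     :return: return mvt_tour, mange_tour(list,list): permet d'obtenir
--     le tableau de déplacement possible et le tableau de pièces qui peuvent
--     etre mange.
--     """
--     mvt_tour_temp = []
--     mange_tour_temp = []
--     # Je regarde sur l'axe horizontal
--     for i in range(8):
--         # On ne regarde pas notre position
--         if (x, y) != (x, i):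
--             # Regarde si je suis sur une piece de mon adversaire
--             if check_position_piece(x, i, adversaire):
--                 if i < y:
--                     mange_tour_temp = [(x, i)]
--                     # espace libre entre deux pieces a supprimer
--                     mvt_tour_temp = []
--                 # Si je suis à droite de la piece je stoppe ma recherche
--                 else:
--                     mange_tour_temp.append((x, i))
--                     break
--             # Regarde si je suis ne suis pas sur une de mes pieces
--             elif not check_position_piece(x, i, joueur):
--                 # Mouvement possible
--                 mvt_tour_temp.append((x, i))
--             # Je suis sur une de mes pieces à droite j'arrete
--             elif i > y:
--                 break
--             # Je suis sur une de mes piece à gauche je continu mais je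
--             # repars de zero
--             else:
--                 mange_tour_temp = []
--                 mvt_tour_temp = []
--     return mvt_tour_temp, mange_tour_temp
-- ===== SOURCE B (Python) =====
-- def mvt_t_h(x, y, joueur, adversaire):
--     adv = {tuple(p) for _, p in adversaire}
--     own = {tuple(p) for _, p in joueur}
--     mange = []
--     left = []
--     for i in range(min(y - 1, 7), -1, -1):
--         if (x, i) in adv:
--             mange.append((x, i))
--             break
--         if (x, i) in own:
--             break
--         left.append((x, i))
--     left.reverse()
--     right = []
--     for i in range(max(y + 1, 0), 8):
--         if (x, i) in adv:
--             mange.append((x, i))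
--             break
--         if (x, i) in own:
--             break
--         right.append((x, i))
--     return left + right, mange
-- ===== Notes on version B (the rewrite author's own statement) =====
-- stated objective: simpler
-- what changed: Replaces A's single left-to-right pass over all 8 columns with its capture/move list resets by two outward scans from the rook's square (leftward from y-1 with a final reverse, then rightward from y+1), each stopping at the first occupied square, over position sets built once from the piece lists.
import Mathlib
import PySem

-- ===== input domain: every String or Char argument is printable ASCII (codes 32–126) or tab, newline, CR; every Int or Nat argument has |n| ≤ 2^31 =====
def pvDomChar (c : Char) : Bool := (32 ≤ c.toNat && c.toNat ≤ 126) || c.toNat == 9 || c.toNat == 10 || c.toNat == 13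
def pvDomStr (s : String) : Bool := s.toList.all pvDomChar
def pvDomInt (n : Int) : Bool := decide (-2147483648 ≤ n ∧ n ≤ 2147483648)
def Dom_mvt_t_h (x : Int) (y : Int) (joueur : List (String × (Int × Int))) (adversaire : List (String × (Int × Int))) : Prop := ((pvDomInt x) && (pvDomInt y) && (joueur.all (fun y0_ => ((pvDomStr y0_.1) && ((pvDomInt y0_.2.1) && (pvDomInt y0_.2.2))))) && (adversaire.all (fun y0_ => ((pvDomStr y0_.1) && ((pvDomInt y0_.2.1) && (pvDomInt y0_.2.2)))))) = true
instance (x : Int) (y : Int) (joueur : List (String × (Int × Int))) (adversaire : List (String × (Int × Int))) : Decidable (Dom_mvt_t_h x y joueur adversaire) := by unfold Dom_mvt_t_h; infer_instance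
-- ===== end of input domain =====

-- B replaces A's single left-to-right pass with list resets by two outward scans (left then
-- right of y) over position sets built once; objective: simpler. Return value only; no mutation.

-- ===== PORT A =====
def check_position_piece (x : Int) (y : Int) (joueur : List (String × (Int × Int))) : Bool :=
  match joueur with
  | [] => false
  | e :: rest => if e.2 = (x, y) then true else check_position_piece x y rest

def mvtLoopA (x y : Int) (joueur adversaire : List (String × (Int × Int))) :
    List Int → List (Int × Int) → List (Int × Int) → (List (Int × Int)) × (List (Int × Int))
  | [], mvt, mange => (mvt, mange)
  | i :: rest, mvt, mange =>
    if (x, y) ≠ (x, i) then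
      if check_position_piece x i adversaire then
        if i < y then mvtLoopA x y joueur adversaire rest [] [(x, i)]
        else (mvt, mange ++ [(x, i)])
      else if ¬ check_position_piece x i joueur then
        mvtLoopA x y joueur adversaire rest (mvt ++ [(x, i)]) mange
      else if i > y then (mvt, mange)
      else mvtLoopA x y joueur adversaire rest [] []
    else mvtLoopA x y joueur adversaire rest mvt mange

def mvt_t_h (x : Int) (y : Int) (joueur : List (String × (Int × Int))) (adversaire : List (String × (Int × Int))) : (List (Int × Int)) × (List (Int × Int)) :=
  mvtLoopA x y joueur adversaire (PySem.List.pyRange 0 8 1) [] []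

-- ===== PORT B =====
def scanDir (x : Int) (adv own : PySem.Set (Int × Int)) :
    List Int → List (Int × Int) → List (Int × Int) → (List (Int × Int)) × (List (Int × Int))
  | [], acc, mange => (acc, mange)
  | i :: rest, acc, mange =>
    if PySem.Set.contains adv (x, i) then (acc, mange ++ [(x, i)])
    else if PySem.Set.contains own (x, i) then (acc, mange)
    else scanDir x adv own rest (acc ++ [(x, i)]) mange

def mvt_t_h_alt (x : Int) (y : Int) (joueur : List (String × (Int × Int))) (adversaire : List (String × (Int × Int))) : (List (Int × Int)) × (List (Int × Int)) :=
  let adv := PySem.Set.ofList (adversaire.map (fun e => e.2))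
  let own := PySem.Set.ofList (joueur.map (fun e => e.2))
  let lres := scanDir x adv own (PySem.List.pyRange (min (y - 1) 7) (-1) (-1)) [] []
  let rres := scanDir x adv own (PySem.List.pyRange (max (y + 1) 0) 8 1) [] lres.2
  (lres.1.reverse ++ rres.1, rres.2)

-- ===== PRECONDITION & SPEC =====
def Spec_mvt_t_h (x : Int) (y : Int) (joueur : List (String × (Int × Int))) (adversaire : List (String × (Int × Int))) (out : (List (Int × Int)) × (List (Int × Int))) : Prop := out = mvt_t_h_alt x y joueur adversaire
instance (x : Int) (y : Int) (joueur : List (String × (Int × Int))) (adversaire : List (String × (Int × Int))) (out : (List (Int × Int)) × (List (Int × Int))) : Decidable (Spec_mvt_t_h x y joueur adversaire out) := by unfold Spec_mvt_t_h; infer_instance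

-- ===== CLAIM (what is proved, stated in full; the proofs are below) =====
def Claim_equal_mvt_t_h : Prop := ∀ (x : Int) (y : Int) (joueur : List (String × (Int × Int))) (adversaire : List (String × (Int × Int))), Dom_mvt_t_h x y joueur adversaire → Spec_mvt_t_h x y joueur adversaire (mvt_t_h x y joueur adversaire)

-- ===== LEMMAS AND PROOFS =====

-- Index-level versions of the two loops (columns only; both ports are these up to mapping i ↦ (x,i)).
def loopAI (y : Int) (f g : Int → Bool) : List Int → List Int → List Int → List Int × List Int
  | [], mvt, mange => (mvt, mange)
  | i :: rest, mvt, mange =>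
    if y ≠ i then
      if f i then
        if i < y then loopAI y f g rest [] [i]
        else (mvt, mange ++ [i])
      else if ¬ g i then loopAI y f g rest (mvt ++ [i]) mange
      else if i > y then (mvt, mange)
      else loopAI y f g rest [] []
    else loopAI y f g rest mvt mange

def scanBI (f g : Int → Bool) : List Int → List Int → List Int → List Int × List Int
  | [], acc, mange => (acc, mange)
  | i :: rest, acc, mange =>
    if f i then (acc, mange ++ [i])
    else if g i then (acc, mange)
    else scanBI f g rest (acc ++ [i]) mange

theorem chk_mem (x i : Int) (l : List (String × (Int × Int))) :
    check_position_piece x i l = true ↔ (x, i) ∈ l.map (fun e => e.2) := by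
  induction l with
  | nil => simp [check_position_piece]
  | cons e rest ih =>
    simp only [check_position_piece, List.map_cons, List.mem_cons]
    split_ifs with h
    · simp [h]
    · exact ⟨fun hr => Or.inr (ih.mp hr),
        fun hh => hh.elim (fun he => absurd he.symm h) ih.mpr⟩

theorem chk_eq (x i : Int) (l : List (String × (Int × Int))) :
    PySem.Set.contains (PySem.Set.ofList (l.map (fun e => e.2))) (x, i) = check_position_piece x i l := by
  rw [Bool.eq_iff_iff, PySem.Set.contains_iff, PySem.Set.mem_ofList, chk_mem]

theorem loopA_eq_loopAI (x y : Int) (j a : List (String × (Int × Int))) (l : List Int)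
    (mvtI mangeI : List Int) :
    mvtLoopA x y j a l (mvtI.map (fun i => (x, i))) (mangeI.map (fun i => (x, i))) =
      ((loopAI y (fun i => check_position_piece x i a) (fun i => check_position_piece x i j) l mvtI mangeI).1.map (fun i => (x, i)),
       (loopAI y (fun i => check_position_piece x i a) (fun i => check_position_piece x i j) l mvtI mangeI).2.map (fun i => (x, i))) := by
  induction l generalizing mvtI mangeI with
  | nil => simp [mvtLoopA, loopAI]
  | cons i rest ih =>
    simp only [mvtLoopA, loopAI]
    by_cases hy : y = i
    · subst hy
      rw [if_neg (fun hh => hh rfl), if_neg (fun hh => hh rfl)]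
      exact ih mvtI mangeI
    · have hxy : (x, y) ≠ (x, i) := by simp [hy]
      rw [if_pos hxy, if_pos hy]
      by_cases hf : check_position_piece x i a = true
      · rw [if_pos hf, if_pos hf]
        by_cases hlt : i < y
        · rw [if_pos hlt, if_pos hlt]
          simpa using ih [] [i]
        · rw [if_neg hlt, if_neg hlt]; simp
      · rw [if_neg hf, if_neg hf]
        by_cases hg : check_position_piece x i j = true
        · rw [if_neg (not_not_intro hg), if_neg (not_not_intro hg)]
          by_cases hgt : i > y
          · rw [if_pos hgt, if_pos hgt]
          · rw [if_neg hgt, if_neg hgt]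
            simpa using ih [] []
        · rw [if_pos hg, if_pos hg]
          simpa using ih (mvtI ++ [i]) mangeI

theorem scanDir_eq_scanBI (x : Int) (j a : List (String × (Int × Int))) (l : List Int)
    (accI mangeI : List Int) :
    scanDir x (PySem.Set.ofList (a.map (fun e => e.2))) (PySem.Set.ofList (j.map (fun e => e.2)))
        l (accI.map (fun i => (x, i))) (mangeI.map (fun i => (x, i))) =
      ((scanBI (fun i => check_position_piece x i a) (fun i => check_position_piece x i j) l accI mangeI).1.map (fun i => (x, i)),
       (scanBI (fun i => check_position_piece x i a) (fun i => check_position_piece x i j) l accI mangeI).2.map (fun i => (x, i))) := by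
  induction l generalizing accI mangeI with
  | nil => simp [scanDir, scanBI]
  | cons i rest ih =>
    simp only [scanDir, scanBI, chk_eq]
    by_cases hf : check_position_piece x i a = true
    · rw [if_pos hf, if_pos hf]; simp
    · rw [if_neg hf, if_neg hf]
      by_cases hg : check_position_piece x i j = true
      · rw [if_pos hg, if_pos hg]
      · rw [if_neg hg, if_neg hg]
        simpa using ih (accI ++ [i]) mangeI

-- scanBI only appends to its accumulators.
theorem scanBI_acc (f g : Int → Bool) (l acc m : List Int) :
    scanBI f g l acc m = (acc ++ (scanBI f g l [] []).1, m ++ (scanBI f g l [] []).2) := by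
  induction l generalizing acc m with
  | nil => simp [scanBI]
  | cons i rest ih =>
    simp only [scanBI]
    by_cases hf : f i = true
    · rw [if_pos hf, if_pos hf]; simp
    · rw [if_neg hf, if_neg hf]
      by_cases hg : g i = true
      · rw [if_pos hg, if_pos hg]; simp
      · rw [if_neg hg, if_neg hg]
        simp only [List.nil_append]
        rw [ih (acc ++ [i]) m, ih [i] []]
        simp

-- No break happens on a list of columns strictly left of y: the loop is a plain fold there.
theorem loopAI_append_left (y : Int) (f g : Int → Bool) (l l' mvt mange : List Int)
    (h : ∀ i ∈ l, i < y) :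
    loopAI y f g (l ++ l') mvt mange =
      loopAI y f g l' (loopAI y f g l mvt mange).1 (loopAI y f g l mvt mange).2 := by
  induction l generalizing mvt mange with
  | nil => simp [loopAI]
  | cons i rest ih =>
    have hi : i < y := h i (by simp)
    have hr : ∀ j ∈ rest, j < y := fun j hj => h j (by simp [hj])
    simp only [List.cons_append, loopAI, if_pos (by omega : y ≠ i)]
    by_cases hf : f i = true
    · rw [if_pos hf, if_pos hf, if_pos hi, if_pos hi]
      exact ih [] [i] hr
    · rw [if_neg hf, if_neg hf]
      by_cases hg : g i = true
      · rw [if_neg (not_not_intro hg), if_neg (not_not_intro hg),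
          if_neg (by omega : ¬ i > y), if_neg (by omega : ¬ i > y)]
        exact ih [] [] hr
      · rw [if_pos hg, if_pos hg]
        exact ih (mvt ++ [i]) mange hr

-- Left phase: the fold with resets equals the reversed right-to-left scan.
theorem loopAI_left (y : Int) (f g : Int → Bool) (l : List Int) (h : ∀ i ∈ l, i < y) :
    loopAI y f g l [] [] =
      ((scanBI f g l.reverse [] []).1.reverse, (scanBI f g l.reverse [] []).2) := by
  induction l using List.reverseRecOn with
  | nil => simp [loopAI, scanBI]
  | append_singleton l i ih =>
    have hi : i < y := h i (by simp)
    have hl : ∀ j ∈ l, j < y := fun j hj => h j (by simp [hj])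
    rw [loopAI_append_left y f g l [i] [] [] hl, ih hl]
    simp only [List.reverse_append, List.reverse_cons, List.reverse_nil, List.nil_append,
      List.cons_append, loopAI, scanBI, if_pos (by omega : y ≠ i)]
    by_cases hf : f i = true
    · rw [if_pos hf, if_pos hf, if_pos hi]
      simp
    · rw [if_neg hf, if_neg hf]
      by_cases hg : g i = true
      · rw [if_neg (not_not_intro hg), if_pos hg, if_neg (by omega : ¬ i > y)]
        simp
      · rw [if_pos hg, if_neg hg]
        rw [scanBI_acc f g l.reverse [i] []]
        simp

-- Right phase: on columns strictly right of y the two loops are the same recursion.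
theorem loopAI_right (y : Int) (f g : Int → Bool) (l mvt mange : List Int)
    (h : ∀ i ∈ l, y < i) :
    loopAI y f g l mvt mange = scanBI f g l mvt mange := by
  induction l generalizing mvt mange with
  | nil => simp [loopAI, scanBI]
  | cons i rest ih =>
    have hi : y < i := h i (by simp)
    have hr : ∀ j ∈ rest, y < j := fun j hj => h j (by simp [hj])
    simp only [loopAI, scanBI, if_pos (by omega : y ≠ i)]
    by_cases hf : f i = true
    · rw [if_pos hf, if_pos hf, if_neg (by omega : ¬ i < y)]
    · rw [if_neg hf, if_neg hf]
      by_cases hg : g i = true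
      · rw [if_neg (not_not_intro hg), if_pos hg, if_pos (by omega : i > y)]
      · rw [if_pos hg, if_neg hg]
        exact ih (mvt ++ [i]) mange hr

-- Index-level main equivalence.
theorem mainI (y : Int) (f g : Int → Bool) :
    loopAI y f g (PySem.List.pyRange 0 8 1) [] [] =
      (((scanBI f g (PySem.List.pyRange (min (y - 1) 7) (-1) (-1)) [] []).1.reverse ++
        (scanBI f g (PySem.List.pyRange (max (y + 1) 0) 8 1) []
          (scanBI f g (PySem.List.pyRange (min (y - 1) 7) (-1) (-1)) [] []).2).1),
       (scanBI f g (PySem.List.pyRange (max (y + 1) 0) 8 1) []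
          (scanBI f g (PySem.List.pyRange (min (y - 1) 7) (-1) (-1)) [] []).2).2) := by
  have hmem : ∀ (a b i : Int), i ∈ PySem.List.pyRange a b 1 → a ≤ i ∧ i < b := by
    intro a b i hi; rwa [PySem.List.mem_pyRange_one] at hi
  by_cases hneg : y < 0
  · rw [min_eq_left (by omega : y - 1 ≤ 7), max_eq_right (by omega : y + 1 ≤ 0),
      PySem.List.pyRange_neg_one_eq_nil (by omega : y - 1 ≤ -1)]
    rw [loopAI_right y f g _ [] [] (fun i hi => by have := hmem _ _ _ hi; omega)]
    simp [scanBI]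
  · by_cases hbig : 8 ≤ y
    · rw [min_eq_right (by omega : (7:Int) ≤ y - 1), max_eq_left (by omega : (0:Int) ≤ y + 1),
        PySem.List.pyRange_one_eq_nil (by omega : (8:Int) ≤ y + 1),
        PySem.List.pyRange_neg_one_eq_reverse,
        show (-1:Int) + 1 = 0 by norm_num, show (7:Int) + 1 = 8 by norm_num]
      rw [loopAI_left y f g _ (fun i hi => by have := hmem _ _ _ hi; omega)]
      simp [scanBI]
    · rw [min_eq_left (by omega : y - 1 ≤ 7), max_eq_left (by omega : (0:Int) ≤ y + 1),
        PySem.List.pyRange_neg_one_eq_reverse,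
        show (-1:Int) + 1 = 0 by norm_num, show y - 1 + 1 = y by ring]
      have h08 : PySem.List.pyRange 0 8 1 =
          PySem.List.pyRange 0 y 1 ++ (y :: PySem.List.pyRange (y + 1) 8 1) := by
        rw [PySem.List.pyRange_one_append 0 y 8 (by omega) (by omega),
          PySem.List.pyRange_one_cons (by omega : y < 8)]
      rw [h08,
        loopAI_append_left y f g _ _ [] [] (fun i hi => by have := hmem _ _ _ hi; omega)]
      rw [loopAI_left y f g _ (fun i hi => by have := hmem _ _ _ hi; omega)]
      simp only [loopAI, if_neg (fun hh : y ≠ y => hh rfl)]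
      rw [loopAI_right y f g _ _ _ (fun i hi => by have := hmem _ _ _ hi; omega)]
      rw [scanBI_acc f g (PySem.List.pyRange (y + 1) 8 1)
          (scanBI f g (PySem.List.pyRange 0 y 1).reverse [] []).1.reverse
          (scanBI f g (PySem.List.pyRange 0 y 1).reverse [] []).2,
        scanBI_acc f g (PySem.List.pyRange (y + 1) 8 1) []
          (scanBI f g (PySem.List.pyRange 0 y 1).reverse [] []).2]
      simp

-- ===== VERDICT (by name: the statement is the Claim_ definition above) =====
theorem mvt_t_h_spec : Claim_equal_mvt_t_h := by
  intro x y joueur adversaire _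
  unfold Spec_mvt_t_h mvt_t_h mvt_t_h_alt
  have hA := loopA_eq_loopAI x y joueur adversaire (PySem.List.pyRange 0 8 1) [] []
  simp only [List.map_nil] at hA
  have hL := scanDir_eq_scanBI x joueur adversaire
    (PySem.List.pyRange (min (y - 1) 7) (-1) (-1)) [] []
  simp only [List.map_nil] at hL
  have hR := scanDir_eq_scanBI x joueur adversaire (PySem.List.pyRange (max (y + 1) 0) 8 1) []
    ((scanBI (fun i => check_position_piece x i adversaire)
      (fun i => check_position_piece x i joueur)
      (PySem.List.pyRange (min (y - 1) 7) (-1) (-1)) [] []).2)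
  simp only [List.map_nil] at hR
  rw [hA, mainI y (fun i => check_position_piece x i adversaire)
    (fun i => check_position_piece x i joueur)]
  simp only [hL, hR]
  simp [List.map_reverse, List.map_append]
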